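-- pv_equiv track=rewrite | github.com/vmkmym/Algorithm | 프로그래머스/1/12930. 이상한 문자 만들기/이상한 문자 만들기.py | solution
-- ===== SOURCE A (Python) =====
-- def solution(s):
--     answer = ""
--
--     for word in s.split(" "):
--         for idx, char in enumerate(word):
--             if idx % 2 == 0:
--                 answer += char.upper()
--             else:
--                 answer += char.lower()
--         answer += " "
--
--     return answer[:-1]
-- ===== SOURCE B (Python) =====
-- def solution(s):
--     out = []
--     idx = 0
--     for ch in s:
--         if ch == " ":
--             out.append(" ")
--             idx = 0
--         else:
--             out.append(ch.upper() if idx % 2 == 0 else ch.lower())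
--             idx += 1
--     return "".join(out)
-- ===== Notes on version B (the rewrite author's own statement) =====
-- stated objective: simpler
-- what changed: Replaces split-into-words with nested loops plus a trailing-space fixup slice by one flat scan over the characters that resets an index counter at each space, so spaces stay in place and no final [:-1] is needed.
import Mathlib
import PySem

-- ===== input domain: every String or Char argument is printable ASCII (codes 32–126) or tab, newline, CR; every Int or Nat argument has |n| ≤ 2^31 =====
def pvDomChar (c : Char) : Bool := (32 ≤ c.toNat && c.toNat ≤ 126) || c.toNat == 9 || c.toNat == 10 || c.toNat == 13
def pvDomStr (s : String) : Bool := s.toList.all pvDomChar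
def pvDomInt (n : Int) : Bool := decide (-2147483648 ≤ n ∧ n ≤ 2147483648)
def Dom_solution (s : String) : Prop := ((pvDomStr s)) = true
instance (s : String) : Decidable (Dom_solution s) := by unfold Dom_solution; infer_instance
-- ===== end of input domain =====

-- B replaces A's split-into-words nested loops + final [:-1] by one flat scan with a counter reset at spaces (simpler decomposition, same cost).

-- ===== PORT A =====
def solution (s : String) : String :=
  let answer : List Char :=
    (PySem.Chars.splitOn s.toList [' ']).foldl (fun answer word =>
      (PySem.List.enumerate word).foldl (fun a ic =>
        if ic.1 % 2 == 0 then a ++ [PySem.Chars.upperChar ic.2]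
        else a ++ [PySem.Chars.lowerChar ic.2]) answer ++ [' ']) []
  String.ofList (PySem.List.slice answer none (some (-1)))

-- ===== PORT B =====
def solAltGo (cs : List Char) (idx : Int) : List Char :=
  match cs with
  | [] => []
  | c :: rest =>
    if c = ' ' then ' ' :: solAltGo rest 0
    else (if idx % 2 == 0 then PySem.Chars.upperChar c else PySem.Chars.lowerChar c)
           :: solAltGo rest (idx + 1)

def solution_alt (s : String) : String := String.ofList (solAltGo s.toList 0)

-- ===== PRECONDITION & SPEC =====
def Spec_solution (s : String) (out : String) : Prop := out = solution_alt s
instance (s : String) (out : String) : Decidable (Spec_solution s out) := by unfold Spec_solution; infer_instance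

-- ===== CLAIM (what is proved, stated in full; the proofs are below) =====
def Claim_equal_solution : Prop := ∀ (s : String), Dom_solution s → Spec_solution s (solution s)

-- ===== LEMMAS AND PROOFS =====

-- the per-word transform: upper at even offsets, lower at odd
def solG (idx : Int) : List Char → List Char
  | [] => []
  | c :: rest =>
    (if idx % 2 == 0 then PySem.Chars.upperChar c else PySem.Chars.lowerChar c) :: solG (idx + 1) rest

-- split on a single space, structurally
def solSplit1 : List Char → List (List Char)
  | [] => [[]]
  | c :: rest =>
    if c = ' ' then [] :: solSplit1 rest
    else match solSplit1 rest with
      | [] => [[c]]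
      | w :: ws => (c :: w) :: ws

theorem solSplit1_ne_nil (cs : List Char) : solSplit1 cs ≠ [] := by
  induction cs with
  | nil => simp [solSplit1]
  | cons c rest ih =>
    simp only [solSplit1]
    split
    · simp
    · cases h : solSplit1 rest <;> simp

theorem splitOn_go_eq (fuel : Nat) (l cur : List Char) (acc : List (List Char))
    (h : l.length < fuel) :
    PySem.Chars.splitOn.go [' '] fuel l cur acc =
      acc.reverse ++ (match solSplit1 l with
        | [] => []
        | w :: ws => (cur.reverse ++ w) :: ws) := by
  induction fuel generalizing l cur acc with
  | zero => omega
  | succ fuel ih =>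
    cases l with
    | nil => simp [PySem.Chars.splitOn.go, solSplit1]
    | cons c rest =>
      by_cases hc : c = ' '
      · subst hc
        have hpre : List.isPrefixOf [' '] (' ' :: rest) = true := by
          simp [List.isPrefixOf]
        simp only [PySem.Chars.splitOn.go, hpre, if_pos]
        have hdrop : List.drop [' '].length (' ' :: rest) = rest := rfl
        rw [hdrop, ih rest [] (cur.reverse :: acc) (by simpa using Nat.lt_of_succ_lt_succ h)]
        have := solSplit1_ne_nil rest
        cases hs : solSplit1 rest with
        | nil => exact absurd hs this
        | cons w ws => simp [solSplit1, hs]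
      · have hpre : List.isPrefixOf [' '] (c :: rest) = false := by
          simp [List.isPrefixOf]
          exact fun h' => absurd h'.symm hc
        simp only [PySem.Chars.splitOn.go, hpre]
        rw [if_neg (by simp)]
        rw [ih rest (c :: cur) acc (by simpa using Nat.lt_of_succ_lt_succ h)]
        have := solSplit1_ne_nil rest
        cases hs : solSplit1 rest with
        | nil => exact absurd hs this
        | cons w ws => simp [solSplit1, hs, hc]

theorem splitOn_space (cs : List Char) :
    PySem.Chars.splitOn cs [' '] = solSplit1 cs := by
  unfold PySem.Chars.splitOn
  rw [splitOn_go_eq cs.length.succ cs [] [] (Nat.lt_succ_self _)]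
  have := solSplit1_ne_nil cs
  cases hs : solSplit1 cs with
  | nil => exact absurd hs this
  | cons w ws => simp

-- A's inner enumerate loop is solG, with accumulator pulled out
theorem inner_foldl_eq (word : List Char) (start : Int) (a : List Char) :
    (PySem.List.enumerate word start).foldl (fun a ic =>
        if ic.1 % 2 == 0 then a ++ [PySem.Chars.upperChar ic.2]
        else a ++ [PySem.Chars.lowerChar ic.2]) a = a ++ solG start word := by
  induction word generalizing start a with
  | nil => simp [PySem.List.enumerate, solG]
  | cons c rest ih =>
    simp only [PySem.List.enumerate, List.foldl, solG]
    rw [ih]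
    split <;> simp

-- A's outer loop: concat of (solG 0 w ++ [' ']) over the words
theorem outer_foldl_eq (ws : List (List Char)) (a : List Char) :
    ws.foldl (fun answer word =>
      (PySem.List.enumerate word).foldl (fun a ic =>
        if ic.1 % 2 == 0 then a ++ [PySem.Chars.upperChar ic.2]
        else a ++ [PySem.Chars.lowerChar ic.2]) answer ++ [' ']) a =
      a ++ ws.flatMap (fun w => solG 0 w ++ [' ']) := by
  induction ws generalizing a with
  | nil => simp
  | cons w ws ih =>
    simp only [List.foldl, List.flatMap_cons]
    rw [inner_foldl_eq, ih]
    simp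

-- B's scan, characterised through solSplit1
theorem altGo_eq (cs : List Char) (idx : Int) :
    solAltGo cs idx = (match solSplit1 cs with
      | [] => []
      | w :: ws => solG idx w ++ ws.flatMap (fun w => ' ' :: solG 0 w)) := by
  induction cs generalizing idx with
  | nil => simp [solAltGo, solSplit1, solG]
  | cons c rest ih =>
    by_cases hc : c = ' '
    · subst hc
      simp only [solAltGo, solSplit1, if_pos rfl]
      rw [ih 0]
      have := solSplit1_ne_nil rest
      cases hs : solSplit1 rest with
      | nil => exact absurd hs this
      | cons w ws => simp [solG]
    · simp only [solAltGo, solSplit1, if_neg hc]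
      rw [ih (idx + 1)]
      have := solSplit1_ne_nil rest
      cases hs : solSplit1 rest with
      | nil => exact absurd hs this
      | cons w ws => simp [solG]

-- dropping A's trailing space turns per-word trailing spaces into separators
theorem flatMap_dropLast (w : List Char) (ws : List (List Char)) :
    ((w :: ws).flatMap (fun v => solG 0 v ++ [' '])).dropLast =
      solG 0 w ++ ws.flatMap (fun v => ' ' :: solG 0 v) := by
  induction ws generalizing w with
  | nil => simp
  | cons w' ws ih =>
    have hne : (w' :: ws).flatMap (fun v => solG 0 v ++ [' ']) ≠ [] := by
      simp
    have hsplit : ((w :: w' :: ws).flatMap (fun v => solG 0 v ++ [' '])) =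
        (solG 0 w ++ [' ']) ++ (w' :: ws).flatMap (fun v => solG 0 v ++ [' ']) := by simp
    rw [hsplit, List.dropLast_append_of_ne_nil hne, ih]
    simp

-- ===== VERDICT (by name: the statement is the Claim_ definition above) =====
theorem solution_spec : Claim_equal_solution := by
  intro s _
  unfold Spec_solution solution solution_alt
  rw [splitOn_space, outer_foldl_eq, altGo_eq]
  have := solSplit1_ne_nil s.toList
  cases hs : solSplit1 s.toList with
  | nil => exact absurd hs this
  | cons w ws =>
    simp only [List.nil_append]
    rw [PySem.List.slice_to_neg_one, flatMap_dropLast]
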